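-- pv_equiv track=rewrite | github.com/StevenMup2004/phase2-track3-day2-memory-systems-for-agents-2A202600339 | src/prompts.py | _trim_lines
-- ===== SOURCE A (Python) =====
-- def _trim_lines(lines: list[str], budget: int) -> list[str]:
-- 	"""Approximate trim by word budget."""
-- 	if budget <= 0:
-- 		return []
-- 	out: list[str] = []
-- 	used = 0
-- 	for line in lines:
-- 		cost = max(1, len(line.split()))
-- 		if used + cost > budget:
-- 			break
-- 		out.append(line)
-- 		used += cost
-- 	return out
-- ===== SOURCE B (Python) =====
-- from itertools import accumulate
--
-- def _trim_lines(lines: list[str], budget: int) -> list[str]: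
--     """Approximate trim by word budget (prefix-sum then slice)."""
--     if budget <= 0:
--         return []
--     totals = list(accumulate(max(1, len(l.split())) for l in lines))
--     n = sum(1 for t in totals if t <= budget)
--     return lines[:n]
-- ===== Notes on version B (the rewrite author's own statement) =====
-- stated objective: alternative
-- what changed: Replaces A's incremental loop with running `used` and break by a build-table-then-slice shape: prefix sums of per-line word costs via itertools.accumulate, count how many prefix totals fit the budget, and slice lines[:n].
import Mathlib
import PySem

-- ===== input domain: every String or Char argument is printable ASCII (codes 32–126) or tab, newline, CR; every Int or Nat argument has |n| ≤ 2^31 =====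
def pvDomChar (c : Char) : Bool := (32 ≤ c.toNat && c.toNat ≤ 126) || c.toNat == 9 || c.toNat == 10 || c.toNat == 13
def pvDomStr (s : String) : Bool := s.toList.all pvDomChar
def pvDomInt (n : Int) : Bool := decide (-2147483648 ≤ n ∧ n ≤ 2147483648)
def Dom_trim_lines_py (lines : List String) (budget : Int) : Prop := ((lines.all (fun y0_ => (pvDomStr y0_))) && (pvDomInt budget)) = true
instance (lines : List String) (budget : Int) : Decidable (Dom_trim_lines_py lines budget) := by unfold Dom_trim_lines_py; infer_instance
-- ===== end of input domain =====

-- B replaces A's incremental accumulate-with-break loop by a prefix-sum table plus a slice (alternative decomposition, same cost).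

-- ===== PORT A =====
-- the for-loop with `break`: state is `used`; stops as soon as a line does not fit
def trimGoA (budget : Int) (used : Int) : List String → List String
  | [] => []
  | line :: rest =>
    let cost : Int := max 1 ((PySem.Str.split₀ line).length : Int)
    if used + cost > budget then []
    else line :: trimGoA budget (used + cost) rest

def trim_lines_py (lines : List String) (budget : Int) : List String :=
  if budget ≤ 0 then [] else trimGoA budget 0 lines

-- ===== PORT B =====
def trimCost (l : String) : Int := max 1 ((PySem.Str.split₀ l).length : Int)

-- itertools.accumulate of the costs
def trimAccum (acc : Int) : List Int → List Int
  | [] => []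
  | c :: cs => (acc + c) :: trimAccum (acc + c) cs

def trim_lines_py_alt (lines : List String) (budget : Int) : List String :=
  if budget ≤ 0 then []
  else
    let totals := trimAccum 0 (lines.map trimCost)
    let n := totals.countP (fun t => t ≤ budget)
    lines.take n

-- ===== PRECONDITION & SPEC =====
def Spec_trim_lines_py (lines : List String) (budget : Int) (out : List String) : Prop := out = trim_lines_py_alt lines budget
instance (lines : List String) (budget : Int) (out : List String) : Decidable (Spec_trim_lines_py lines budget out) := by unfold Spec_trim_lines_py; infer_instance

-- ===== CLAIM (what is proved, stated in full; the proofs are below) =====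
def Claim_equal_trim_lines_py : Prop := ∀ (lines : List String) (budget : Int), Dom_trim_lines_py lines budget → Spec_trim_lines_py lines budget (trim_lines_py lines budget)

-- ===== LEMMAS AND PROOFS =====

-- every prefix total is strictly above the start value when all costs are ≥ 1
lemma trimAccum_gt (cs : List Int) (h : ∀ c ∈ cs, 1 ≤ c) :
    ∀ a : Int, ∀ t ∈ trimAccum a cs, a < t := by
  induction cs with
  | nil => intro a t ht; simp [trimAccum] at ht
  | cons c cs ih =>
    intro a t ht
    simp only [trimAccum, List.mem_cons] at ht
    have hc : 1 ≤ c := h c (by simp)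
    rcases ht with rfl | ht
    · omega
    · have := ih (fun x hx => h x (by simp [hx])) (a + c) t ht
      omega

lemma cost_eq_trimCost (l : String) : max 1 ((PySem.Str.split₀ l).length : Int) = trimCost l := rfl

lemma trimGoA_eq (budget : Int) (lines : List String) : ∀ used : Int,
    trimGoA budget used lines =
      lines.take ((trimAccum used (lines.map trimCost)).countP (fun t => t ≤ budget)) := by
  induction lines with
  | nil => intro used; simp [trimGoA, trimAccum]
  | cons line rest ih =>
    intro used
    have hcost : (1 : Int) ≤ trimCost line := le_max_left _ _
    simp only [trimGoA, List.map_cons, trimAccum, cost_eq_trimCost]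
    by_cases hfit : used + trimCost line > budget
    · -- break: no prefix total fits, countP = 0
      have hall : ∀ t ∈ (used + trimCost line) :: trimAccum (used + trimCost line) (rest.map trimCost),
          ¬ (t ≤ budget) := by
        intro t ht
        rcases List.mem_cons.mp ht with rfl | ht
        · omega
        · have := trimAccum_gt (rest.map trimCost)
            (by intro c hc; rcases List.mem_map.mp hc with ⟨l, _, rfl⟩; exact le_max_left _ _)
            (used + trimCost line) t ht
          omega
      rw [List.countP_eq_zero.mpr (by simpa using hall), if_pos hfit]
      simp
    · have hfit' : used + trimCost line ≤ budget := not_lt.mp hfit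
      rw [if_neg hfit, List.countP_cons, if_pos (by simpa using hfit'),
        List.take_succ_cons, ih (used + trimCost line)]

-- ===== VERDICT (by name: the statement is the Claim_ definition above) =====
theorem trim_lines_py_spec : Claim_equal_trim_lines_py := by
  intro lines budget _
  unfold Spec_trim_lines_py trim_lines_py trim_lines_py_alt
  by_cases hb : budget ≤ 0
  · simp [hb]
  · simp only [hb, if_false]
    exact trimGoA_eq budget lines 0
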